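-- pv_equiv track=rewrite | github.com/yf8848/algorithm | grokking_algorithms/4_2_num.py | recursiveNum
-- ===== SOURCE A (Python) =====
-- def recursiveNum(arr):
--     size = len(arr)
--     if 0 == size:
--         return None
--     elif 1 == size:
--         return 1
--     else:
--         return 1+recursiveNum(arr[1:size])
-- ===== SOURCE B (Python) =====
-- def recursiveNum(arr):
--     if not arr:
--         return None
--     count = 0
--     for _ in arr:
--         count += 1
--     return count
-- ===== Notes on version B (the rewrite author's own statement) =====
-- stated objective: simpler
-- what changed: Replaces the O(n^2) slicing recursion with a single iterative counting loop (empty guard kept), avoiding per-call list copies and recursion depth limits.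
import Mathlib
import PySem

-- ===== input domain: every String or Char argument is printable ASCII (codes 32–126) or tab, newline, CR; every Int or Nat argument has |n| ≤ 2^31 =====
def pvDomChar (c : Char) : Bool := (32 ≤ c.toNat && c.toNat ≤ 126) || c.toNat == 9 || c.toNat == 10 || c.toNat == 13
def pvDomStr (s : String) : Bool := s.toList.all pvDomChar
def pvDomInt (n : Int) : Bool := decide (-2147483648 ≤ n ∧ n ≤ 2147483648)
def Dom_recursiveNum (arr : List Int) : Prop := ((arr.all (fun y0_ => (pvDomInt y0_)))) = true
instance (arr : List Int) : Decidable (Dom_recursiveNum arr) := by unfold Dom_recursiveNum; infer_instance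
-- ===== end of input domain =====

-- B replaces A's quadratic slicing recursion with one iterative counting loop (empty guard kept): same values, simpler and faster.


-- ===== PORT A =====
-- literal transliteration: size = len(arr); if 0 == size: None; elif 1 == size: 1; else 1 + recursiveNum(arr[1:size])
-- (the recursive call on a non-empty list always returns a value, so Python's `1 + …` is `Option.map (1 + ·)` here)
def recursiveNum (arr : List Int) : Option Int :=
  let size := arr.length
  if 0 = size then none
  else if 1 = size then some 1
  else (recursiveNum (PySem.List.slice arr (some (1 : Int)) (some (size : Int)))).map (fun r => 1 + r)
termination_by arr.length
decreasing_by
  simp [PySem.List.slice]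
  omega

-- ===== PORT B =====
-- empty guard returning None, then an iterative counting loop: count = 0; for _ in arr: count += 1
def recursiveNum_alt (arr : List Int) : Option Int :=
  if arr = [] then none
  else some (arr.foldl (fun count _ => count + 1) 0)

-- ===== PRECONDITION & SPEC =====
def Spec_recursiveNum (arr : List Int) (out : Option Int) : Prop := out = recursiveNum_alt arr
instance (arr : List Int) (out : Option Int) : Decidable (Spec_recursiveNum arr out) := by unfold Spec_recursiveNum; infer_instance

-- ===== CLAIM (what is proved, stated in full; the proofs are below) =====
def Claim_equal_recursiveNum : Prop := ∀ (arr : List Int), Dom_recursiveNum arr → Spec_recursiveNum arr (recursiveNum arr)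

-- ===== LEMMAS AND PROOFS =====

-- A returns the length of any non-empty list
theorem recursiveNum_eq_length (arr : List Int) (h : arr ≠ []) :
    recursiveNum arr = some (arr.length : Int) := by
  fun_induction recursiveNum arr with
  | case1 arr size hc =>
    exact absurd (List.length_eq_zero_iff.mp hc.symm) h
  | case2 arr size hc0 hc1 =>
    have h1 : (1:ℕ) = arr.length := hc1
    rw [← h1]; norm_num
  | case3 arr size hc0 hc1 ih =>
    have hne : PySem.List.slice arr (some (1:Int)) (some (size:Int)) ≠ [] := by
      simp only [ne_eq, ← List.length_eq_zero_iff]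
      simp [PySem.List.slice]
      omega
    rw [ih hne]
    have hlen : (PySem.List.slice arr (some (1:Int)) (some (size:Int))).length = arr.length - 1 := by
      simp [PySem.List.slice]
      omega
    simp only [Option.map_some, hlen]
    congr 1
    omega

-- B's counting loop computes the length
theorem foldl_count (arr : List Int) (c : Int) :
    arr.foldl (fun count _ => count + 1) c = c + arr.length := by
  induction arr generalizing c with
  | nil => simp
  | cons x t ih => simp [List.foldl, ih]; omega

-- ===== VERDICT (by name: the statement is the Claim_ definition above) =====
theorem recursiveNum_spec : Claim_equal_recursiveNum := by
  intro arr _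
  unfold Spec_recursiveNum recursiveNum_alt
  by_cases h : arr = []
  · subst h; rw [recursiveNum]; simp
  · rw [if_neg h, recursiveNum_eq_length arr h, foldl_count]
    simp
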